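-- pv_equiv track=rewrite | github.com/mArcinUci/Code_Wars_tryouts | reverse_sublists_of_even_numbers.py | reverse_even_sequences
-- ===== SOURCE A (Python) =====
-- def reverse_even_sequences(lst):
--     start = None
--     length = len(lst)
--
--     for i in range(length):
--         if lst[i] % 2 == 0:
--             if start is None:
--                 start = i
--         elif start is not None:
--             sublist = lst[start:i]
--             lst[start:i] = sublist[::-1]
--             start = None
--
--     if start is not None:  # Reverse the last sequence if it's even
--         sublist = lst[start:]
--         lst[start:] = sublist[::-1]
--
--     return lst
-- ===== SOURCE B (Python) =====
-- def reverse_even_sequences(lst):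
--     out = []
--     stack = []
--     for x in lst:
--         if x % 2 == 0:
--             stack.append(x)
--         else:
--             while stack:
--                 out.append(stack.pop())
--             out.append(x)
--     while stack:
--         out.append(stack.pop())
--     lst[:] = out
--     return lst
-- ===== Notes on version B (the rewrite author's own statement) =====
-- stated objective: alternative
-- what changed: Replaced A's start-index tracking with slice reversal assignments by a stack-based single pass: even numbers are pushed onto a stack and popped (LIFO) into the output at each odd element and at the end, so the reversal emerges from pop order with no index arithmetic, no slicing and no explicit reverse.
import Mathlib
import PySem

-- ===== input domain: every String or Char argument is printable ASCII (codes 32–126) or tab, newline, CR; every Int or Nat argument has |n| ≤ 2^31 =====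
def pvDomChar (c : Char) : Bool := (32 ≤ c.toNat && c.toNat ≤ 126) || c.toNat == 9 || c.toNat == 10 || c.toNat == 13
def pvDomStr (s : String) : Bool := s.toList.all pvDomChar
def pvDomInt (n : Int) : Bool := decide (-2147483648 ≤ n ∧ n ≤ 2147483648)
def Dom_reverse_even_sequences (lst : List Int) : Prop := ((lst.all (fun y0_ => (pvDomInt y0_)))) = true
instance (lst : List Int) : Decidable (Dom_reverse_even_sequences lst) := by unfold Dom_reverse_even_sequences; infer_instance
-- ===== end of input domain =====

-- B replaces A's start-index/slice-reversal scan by a stack-based single pass (evens are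
-- pushed and popped LIFO at each odd element and at the end); same O(n) cost, no index
-- arithmetic, no slicing, no explicit reverse. Both Pythons mutate the argument list in
-- place (B via lst[:] = ...); the equivalence proved here is about the returned value
-- (= the mutated list).

-- ===== PORT A =====
-- one iteration of A's for-loop; i is the loop index, st = (lst, start).
-- lst[i] is always in range when the loop runs, so pyGetD's default 0 is never used.
def pvAStep (st : List Int × Option Int) (i : Int) : List Int × Option Int :=
  if PySem.Int.mod (PySem.List.pyGetD st.1 i 0) 2 == 0 then
    match st.2 with
    | none => (st.1, some i)
    | some _ => st
  else
    match st.2 with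
    | none => st
    | some s =>
      -- sublist = lst[start:i]; lst[start:i] = sublist[::-1]
      let sublist := PySem.List.slice st.1 (some s) (some i)
      (PySem.List.slice st.1 none (some s) ++ sublist.reverse
         ++ PySem.List.slice st.1 (some i) none, none)

def reverse_even_sequences (lst : List Int) : List Int :=
  let length : Int := lst.length
  let st := (PySem.List.pyRange 0 length 1).foldl pvAStep (lst, none)
  match st.2 with
  | none => st.1
  | some s =>
      -- sublist = lst[start:]; lst[start:] = sublist[::-1]
      PySem.List.slice st.1 none (some s) ++ (PySem.List.slice st.1 (some s) none).reverse

-- ===== PORT B =====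
def pvEven (x : Int) : Bool := PySem.Int.mod x 2 == 0

-- 'while stack: out.append(stack.pop())' — pop from the end until the stack is empty
def pvPopAll (out : List Int) (stack : List Int) : List Int :=
  if h : stack = [] then out
  else pvPopAll (out ++ [stack.getLast h]) stack.dropLast
termination_by stack.length
decreasing_by
  have : 0 < stack.length := List.length_pos_iff.mpr h
  simp [List.length_dropLast]; omega

-- one iteration of B's for-loop; st = (out, stack)
def pvBStep (st : List Int × List Int) (x : Int) : List Int × List Int :=
  if pvEven x then (st.1, st.2 ++ [x])
  else (pvPopAll st.1 st.2 ++ [x], [])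

def reverse_even_sequences_alt (lst : List Int) : List Int :=
  let st := lst.foldl pvBStep ([], [])
  pvPopAll st.1 st.2

-- ===== PRECONDITION & SPEC =====
def Spec_reverse_even_sequences (lst : List Int) (out : List Int) : Prop := out = reverse_even_sequences_alt lst
instance (lst : List Int) (out : List Int) : Decidable (Spec_reverse_even_sequences lst out) := by unfold Spec_reverse_even_sequences; infer_instance

-- ===== CLAIM (what is proved, stated in full; the proofs are below) =====
def Claim_equal_reverse_even_sequences : Prop := ∀ (lst : List Int), Dom_reverse_even_sequences lst → Spec_reverse_even_sequences lst (reverse_even_sequences lst)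

-- ===== LEMMAS AND PROOFS =====
-- proof-side characterisation: the list split into maximal parity runs, even runs reversed
def pvGroups : List Int → List (Bool × List Int)
  | [] => []
  | x :: xs =>
    let k := pvEven x
    (k, x :: xs.takeWhile (fun y => pvEven y == k))
      :: pvGroups (xs.dropWhile (fun y => pvEven y == k))
termination_by l => l.length
decreasing_by simpa using Nat.lt_succ_of_le (List.length_dropWhile_le _ _)

def pvF (l : List Int) : List Int :=
  (pvGroups l).flatMap (fun g => if g.1 then g.2.reverse else g.2)

theorem pvGroups_cons (x : Int) (xs : List Int) : pvGroups (x :: xs) =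
    (pvEven x, x :: xs.takeWhile (fun y => pvEven y == pvEven x))
      :: pvGroups (xs.dropWhile (fun y => pvEven y == pvEven x)) := by
  rw [pvGroups]

theorem pvF_cons (x : Int) (xs : List Int) : pvF (x :: xs) =
    (if pvEven x then (x :: xs.takeWhile (fun y => pvEven y == pvEven x)).reverse
     else x :: xs.takeWhile (fun y => pvEven y == pvEven x))
      ++ pvF (xs.dropWhile (fun y => pvEven y == pvEven x)) := by
  rw [pvF, pvGroups_cons]; simp [pvF]

theorem pvF_length (l : List Int) : (pvF l).length = l.length := by
  induction l using pvGroups.induct with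
  | case1 => simp [pvF, pvGroups]
  | case2 x xs k ih =>
    rw [pvF_cons]
    have h := congrArg List.length (List.takeWhile_append_dropWhile (p := fun y => pvEven y == pvEven x) (l := xs))
    simp only [List.length_append] at h
    have ih' : (pvF (xs.dropWhile (fun y => pvEven y == pvEven x))).length
        = (xs.dropWhile (fun y => pvEven y == pvEven x)).length := by
      simpa [k] using ih
    split <;> simp [ih'] <;> omega

theorem pvF_odd_cons (x : Int) (l : List Int) (hx : pvEven x = false) :
    pvF (x :: l) = x :: pvF l := by
  rw [pvF_cons]
  rw [if_neg (by simp [hx])]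
  cases l with
  | nil => simp [pvF, pvGroups]
  | cons y t =>
    by_cases hy : pvEven y = true
    · simp [hy, hx]
    · have hy' : pvEven y = false := by simpa using hy
      simp only [List.takeWhile_cons, List.dropWhile_cons, hy', hx, beq_self_eq_true, if_pos]
      rw [pvF_cons, if_neg (by simp [hy'])]
      simp [hy']

theorem pvF_even_run (r rest : List Int) (hr : ∀ y ∈ r, pvEven y = true)
    (hh : ∀ z, rest.head? = some z → pvEven z = false) :
    pvF (r ++ rest) = r.reverse ++ pvF rest := by
  cases r with
  | nil => simp
  | cons x rr =>
    have hx : pvEven x = true := hr x (by simp)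
    have hrr : ∀ y ∈ rr, (fun y => pvEven y == pvEven x) y = true := by
      intro y hy; simp [hr y (by simp [hy]), hx]
    rw [List.cons_append, pvF_cons,
        List.takeWhile_append_of_pos hrr, List.dropWhile_append_of_pos hrr]
    have htw : rest.takeWhile (fun y => pvEven y == pvEven x) = [] := by
      cases rest with
      | nil => rfl
      | cons z t => simp [hh z rfl, hx]
    have hdw : rest.dropWhile (fun y => pvEven y == pvEven x) = rest := by
      cases rest with
      | nil => rfl
      | cons z t => simp [hh z rfl, hx]
    rw [htw, hdw, if_pos (by simp [hx])]
    simp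

theorem pvF_all_even (r : List Int) (hr : ∀ y ∈ r, pvEven y = true) :
    pvF r = r.reverse := by
  have := pvF_even_run r [] hr (by intro z hz; simp at hz)
  simpa [pvF, pvGroups] using this

def pvEndsOdd (l : List Int) : Prop := ∀ z, l.getLast? = some z → pvEven z = false

theorem pvF_append (xs ys : List Int) (hx : pvEndsOdd xs) :
    pvF (xs ++ ys) = pvF xs ++ pvF ys := by
  induction hn : xs.length using Nat.strong_induction_on generalizing xs ys with
  | _ n ih =>
  subst hn
  match xs with
  | [] => simp [pvF, pvGroups]
  | x :: t =>
    by_cases hxe : pvEven x = true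
    · -- xs starts even: split off the maximal even run
      set r := (x :: t).takeWhile pvEven with hrdef
      set rest := (x :: t).dropWhile pvEven with hrestdef
      have hsplit : r ++ rest = x :: t := List.takeWhile_append_dropWhile
      have hrall : ∀ y ∈ r, pvEven y = true := fun y hy => List.mem_takeWhile_imp hy
      have hrne : r ≠ [] := by simp [hrdef, hxe]
      have hrestne : rest ≠ [] := by
        intro hre
        have hall : ∀ y ∈ x :: t, pvEven y = true := by
          intro y hy; exact hrall y (by rw [← hsplit, hre] at hy; simpa using hy)
        obtain ⟨z, hz⟩ : ∃ z, (x :: t).getLast? = some z :=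
          ⟨_, List.getLast?_eq_some_getLast (by simp)⟩
        have := hx z hz
        rw [hall z (List.mem_of_getLast? hz)] at this; simp at this
      have hhead : ∀ z, rest.head? = some z → pvEven z = false := by
        intro z hz
        have := List.head?_dropWhile_not pvEven (x :: t)
        rw [← hrestdef, hz] at this
        simpa using this
      have hrestlen : rest.length < (x :: t).length := by
        have h1 := congrArg List.length hsplit
        simp only [List.length_append] at h1
        have : 0 < r.length := List.length_pos_iff.mpr hrne
        omega
      have hrestEnds : pvEndsOdd rest := by
        intro z hz
        apply hx z
        rw [← hsplit, List.getLast?_append_of_ne_nil _ hrestne, hz]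
      calc pvF (x :: t ++ ys) = pvF (r ++ (rest ++ ys)) := by rw [← hsplit]; simp
        _ = r.reverse ++ pvF (rest ++ ys) := by
            apply pvF_even_run r _ hrall
            intro z hz
            apply hhead
            cases hre : rest with
            | nil => exact absurd hre hrestne
            | cons a b => rw [hre] at hz; simpa using hz
        _ = r.reverse ++ (pvF rest ++ pvF ys) := by rw [ih rest.length hrestlen rest ys hrestEnds rfl]
        _ = (r.reverse ++ pvF rest) ++ pvF ys := by simp
        _ = pvF (r ++ rest) ++ pvF ys := by rw [pvF_even_run r rest hrall hhead]
        _ = pvF (x :: t) ++ pvF ys := by rw [hsplit]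
    · have hxo : pvEven x = false := by simpa using hxe
      have htEnds : pvEndsOdd t := by
        intro z hz
        apply hx z
        have : t ≠ [] := by intro he; rw [he] at hz; simp at hz
        rw [show x :: t = [x] ++ t by simp, List.getLast?_append_of_ne_nil _ this, hz]
      rw [List.cons_append, pvF_odd_cons x _ hxo, ih t.length (by simp) t ys htEnds rfl,
          pvF_odd_cons x t hxo]
      simp

def pvInv (L : List Int) (i : Nat) (st : List Int × Option Int) : Prop :=
  match st.2 with
  | none => st.1 = pvF (L.take i) ++ L.drop i ∧ pvEndsOdd (L.take i)
  | some sI => ∃ s : Nat, sI = (s : Int) ∧ s < i ∧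
      st.1 = pvF (L.take s) ++ L.drop s ∧ pvEndsOdd (L.take s) ∧
      (∀ y ∈ (L.drop s).take (i - s), pvEven y = true)

-- basic facts about the invariant's list shape
theorem pvFlen (L : List Int) (s : Nat) (hs : s ≤ L.length) :
    (pvF (L.take s)).length = s := by
  rw [pvF_length, List.length_take]; omega

theorem pvCur_drop (L : List Int) (s i : Nat) (hs : s ≤ L.length) (hsi : s ≤ i) :
    (pvF (L.take s) ++ L.drop s).drop i = L.drop i := by
  rw [List.drop_append, List.drop_eq_nil_of_le (by rw [pvFlen L s hs]; exact hsi),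
      pvFlen L s hs, List.drop_drop]
  simp [Nat.add_sub_cancel' hsi]

theorem pvCur_take (L : List Int) (s : Nat) (hs : s ≤ L.length) :
    (pvF (L.take s) ++ L.drop s).take s = pvF (L.take s) := by
  have h := List.take_left (l₁ := pvF (L.take s)) (l₂ := L.drop s)
  rwa [pvFlen L s hs] at h

theorem pvCur_get (L : List Int) (s i : Nat) (hsi : s ≤ i) (hi : i < L.length) :
    PySem.List.pyGetD (pvF (L.take s) ++ L.drop s) (i : Int) 0 = L[i] := by
  have hs : s ≤ L.length := le_of_lt (lt_of_le_of_lt hsi hi)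
  rw [PySem.List.pyGetD_natCast, List.getD_eq_getElem?_getD, List.getElem?_append_right
    (by rw [pvFlen L s hs]; exact hsi), pvFlen L s hs, List.getElem?_drop]
  rw [Nat.add_sub_cancel' hsi]
  simp [hi]

-- the run extended by one element
theorem pvRun_snoc (L : List Int) (s i : Nat) (hsi : s ≤ i) (hi : i < L.length) :
    (L.drop s).take (i + 1 - s) = (L.drop s).take (i - s) ++ [L[i]] := by
  have h1 : i + 1 - s = (i - s) + 1 := by omega
  rw [h1, List.take_add_one, List.getElem?_drop, Nat.add_sub_cancel' hsi]
  simp [hi]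

theorem pvTake_succ_concat (L : List Int) (i : Nat) (hi : i < L.length) :
    L.take (i + 1) = L.take i ++ [L[i]] := by
  rw [List.take_add_one]; simp [hi]

theorem pvEndsOdd_concat (l : List Int) (x : Int) (hx : pvEven x = false) :
    pvEndsOdd (l ++ [x]) := by
  intro z hz
  rw [List.getLast?_concat] at hz
  cases hz; exact hx

theorem pvF_singleton_odd (x : Int) (hx : pvEven x = false) : pvF [x] = [x] := by
  rw [pvF_odd_cons x [] hx]; simp [pvF, pvGroups]

theorem pvLoop_inv (L : List Int) : ∀ i, i ≤ L.length →
    pvInv L i ((List.range i).foldl (fun st (k : Nat) => pvAStep st (k : Int)) (L, none))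
  | 0, _ => by
    constructor
    · simp [pvF, pvGroups]
    · intro z hz; simp at hz
  | (i+1), hi => by
    have hin : i < L.length := hi
    have IH := pvLoop_inv L i (le_of_lt hin)
    rw [List.range_succ, List.foldl_append]
    set st := (List.range i).foldl (fun st (k : Nat) => pvAStep st (k : Int)) (L, none) with hst
    simp only [List.foldl_cons, List.foldl_nil]
    obtain ⟨cur, opt⟩ := st
    cases opt with
    | none =>
      obtain ⟨hcur, hends⟩ := IH
      replace hcur : cur = pvF (L.take i) ++ L.drop i := hcur
      have hget : PySem.List.pyGetD cur (i : Int) 0 = L[i] := by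
        rw [hcur]; exact pvCur_get L i i le_rfl hin
      by_cases he : pvEven L[i] = true
      · -- even, start := i
        have : pvAStep (cur, none) (i : Int) = (cur, some (i : Int)) := by
          simp only [pvAStep, hget]
          rw [if_pos (by simpa [pvEven] using he)]
        rw [this]
        refine ⟨i, rfl, by omega, hcur, hends, ?_⟩
        have h1 : (L.drop i).take (i + 1 - i) = [L[i]] := by
          rw [show i + 1 - i = 1 by omega, List.drop_eq_getElem_cons hin]
          rfl
        rw [h1]
        intro y hy
        simp at hy
        rw [hy]; exact he
      · -- odd, nothing happens
        have ho : pvEven L[i] = false := by simpa using he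
        have : pvAStep (cur, none) (i : Int) = (cur, none) := by
          simp only [pvAStep, hget]
          rw [if_neg (by simpa [pvEven] using he)]
        rw [this]
        refine ⟨?_, ?_⟩
        · rw [hcur, pvTake_succ_concat L i hin,
              pvF_append _ [L[i]] hends, pvF_singleton_odd _ ho,
              List.drop_eq_getElem_cons hin]
          simp
        · rw [pvTake_succ_concat L i hin]
          exact pvEndsOdd_concat _ _ ho
    | some sI =>
      obtain ⟨s, hsEq, hslt, hcur, hends, hrun⟩ := IH
      obtain rfl : sI = (s : Int) := hsEq
      replace hcur : cur = pvF (L.take s) ++ L.drop s := hcur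
      replace hrun : ∀ y ∈ (L.drop s).take (i - s), pvEven y = true := hrun
      have hsi : s ≤ i := le_of_lt hslt
      have hsL : s ≤ L.length := le_of_lt (lt_of_le_of_lt hsi hin)
      have hget : PySem.List.pyGetD cur (i : Int) 0 = L[i] := by
        rw [hcur]; exact pvCur_get L s i hsi hin
      by_cases he : pvEven L[i] = true
      · -- even, run continues
        have : pvAStep (cur, some (s : Int)) (i : Int) = (cur, some (s : Int)) := by
          simp only [pvAStep, hget]
          rw [if_pos (by simpa [pvEven] using he)]
        rw [this]
        refine ⟨s, rfl, by omega, hcur, hends, ?_⟩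
        rw [pvRun_snoc L s i hsi hin]
        intro y hy
        rcases List.mem_append.mp hy with h | h
        · exact hrun y h
        · simp at h; rw [h]; exact he
      · -- odd: reverse lst[s:i]
        have ho : pvEven L[i] = false := by simpa using he
        have heq : pvAStep (cur, some (s : Int)) (i : Int)
            = (PySem.List.slice cur none (some (s:Int))
                ++ (PySem.List.slice cur (some (s:Int)) (some (i:Int))).reverse
                ++ PySem.List.slice cur (some (i:Int)) none, none) := by
          simp only [pvAStep, hget]
          rw [if_neg (by simpa [pvEven] using he)]
        rw [heq]
        have hrunodd : ∀ z, ([L[i]] : List Int).head? = some z → pvEven z = false := by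
          intro z hz; simp at hz; subst hz; exact ho
        have hFtake : pvF (L.take (i+1))
            = pvF (L.take s) ++ ((L.drop s).take (i - s)).reverse ++ [L[i]] := by
          have h1 : L.take (i+1) = L.take s ++ ((L.drop s).take (i - s) ++ [L[i]]) := by
            rw [show i + 1 = s + (i + 1 - s) by omega, List.take_add,
                pvRun_snoc L s i hsi hin]
          rw [h1, pvF_append _ _ hends, pvF_even_run _ _ hrun hrunodd,
              pvF_singleton_odd _ ho]
          simp
        refine ⟨?_, ?_⟩
        · rw [PySem.List.slice_to_natCast, PySem.List.slice_from_natCast,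
              PySem.List.slice_natCast, hcur, pvCur_take L s hsL, pvCur_drop L s s hsL le_rfl,
              pvCur_drop L s i hsL hsi, hFtake, List.drop_eq_getElem_cons hin]
          simp
        · rw [show i + 1 = s + (i + 1 - s) by omega, List.take_add,
              pvRun_snoc L s i hsi hin, ← List.append_assoc]
          exact pvEndsOdd_concat _ _ ho

-- B-side: popping the whole stack appends its reverse
theorem pvPopAll_eq (stack : List Int) : ∀ out, pvPopAll out stack = out ++ stack.reverse := by
  induction stack using List.reverseRecOn with
  | nil => intro out; simp [pvPopAll]
  | append_singleton ys y ih =>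
    intro out
    rw [pvPopAll, dif_neg (by simp)]
    simp [ih]

-- B's loop invariant: with an all-even pending stack, flushing the final state yields
-- out followed by the parity-run characterisation of (stack ++ remaining input)
theorem pvB_inv (l : List Int) : ∀ out stack, (∀ y ∈ stack, pvEven y = true) →
    pvPopAll (l.foldl pvBStep (out, stack)).1 (l.foldl pvBStep (out, stack)).2
      = out ++ pvF (stack ++ l) := by
  induction l with
  | nil =>
    intro out stack h
    simp [pvPopAll_eq, pvF_all_even stack h]
  | cons x xs ih =>
    intro out stack h
    by_cases hx : pvEven x = true
    · rw [List.foldl_cons, show pvBStep (out, stack) x = (out, stack ++ [x]) by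
        simp [pvBStep, hx]]
      rw [ih out (stack ++ [x]) (by
        intro y hy
        rcases List.mem_append.mp hy with hm | hm
        · exact h y hm
        · simp at hm; rw [hm]; exact hx)]
      simp
    · have hx' : pvEven x = false := by simpa using hx
      rw [List.foldl_cons, show pvBStep (out, stack) x = (pvPopAll out stack ++ [x], []) by
        simp [pvBStep, hx']]
      rw [ih _ [] (by simp), pvPopAll_eq]
      rw [show stack ++ x :: xs = stack ++ (x :: xs) by simp,
          pvF_even_run stack (x :: xs) h (by intro z hz; simp at hz; rw [← hz]; exact hx'),
          pvF_odd_cons x xs hx']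
      simp

theorem pvAlt_eq_F (l : List Int) : reverse_even_sequences_alt l = pvF l := by
  unfold reverse_even_sequences_alt
  simpa using pvB_inv l [] [] (by simp)

theorem pvMain (L : List Int) : reverse_even_sequences L = reverse_even_sequences_alt L := by
  rw [pvAlt_eq_F]
  unfold reverse_even_sequences
  simp only []
  rw [PySem.List.pyRange_zero_natCast, List.foldl_map]
  have INV := pvLoop_inv L L.length le_rfl
  set st := (List.range L.length).foldl (fun st (k : Nat) => pvAStep st (k : Int)) (L, none)
    with hst
  obtain ⟨cur, opt⟩ := st
  cases opt with
  | none =>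
    obtain ⟨hcur, -⟩ := INV
    replace hcur : cur = pvF (L.take L.length) ++ L.drop L.length := hcur
    simp only []
    rw [hcur]
    simp
  | some sI =>
    obtain ⟨s, hsEq, hslt, hcur, hends, hrun⟩ := INV
    obtain rfl : sI = (s : Int) := hsEq
    replace hcur : cur = pvF (L.take s) ++ L.drop s := hcur
    replace hrun : ∀ y ∈ (L.drop s).take (L.length - s), pvEven y = true := hrun
    have hsL : s ≤ L.length := le_of_lt hslt
    have hrun' : ∀ y ∈ L.drop s, pvEven y = true := by
      intro y hy
      apply hrun
      rwa [List.take_of_length_le (by rw [List.length_drop])]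
    simp only []
    rw [PySem.List.slice_to_natCast, PySem.List.slice_from_natCast, hcur,
        pvCur_take L s hsL, pvCur_drop L s s hsL le_rfl]
    conv_rhs => rw [show L = L.take s ++ L.drop s by simp]
    rw [pvF_append _ _ hends, pvF_all_even _ hrun']

-- ===== VERDICT (by name: the statement is the Claim_ definition above) =====
theorem reverse_even_sequences_spec : Claim_equal_reverse_even_sequences := by
  intro lst _
  unfold Spec_reverse_even_sequences
  exact pvMain lst
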